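-- pv_equiv track=rewrite | github.com/BrendanHart/seminar-parsing-nlp | seminartagger.py | extractHeaderAbstract
-- ===== SOURCE A (Python) =====
-- import nltk, string, re
--
-- def extractHeaderAbstract(raw):
--     splitRaw = raw.split("\n")
--     for i in range(len(splitRaw)):
--         if splitRaw[i].startswith("Abstract:"):
--             return ("\n".join(splitRaw[:i]), "\n".join(splitRaw[(i+1):] if i+1 < len(splitRaw) else []))
--     return (raw, None)
--
--     for p in corpus.paras():
--         para = ""
--         if p != []:
--             for s in p:
--                 if s != []:
--                     paras = ("<sentence>" + "".join([" "+i if not i.startswith("'") and i not in string.punctuation else i for i in s]).strip()) + "</sentence>"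
--         para += "<paragraph>" + paras[1:] + "</paragraph>"
--         para += "\n"
-- ===== SOURCE B (Python) =====
-- def extractHeaderAbstract(raw):
--     # Locate the first line that starts with "Abstract:" by substring search
--     # on the raw text instead of building a list of lines.
--     if raw.startswith("Abstract:"):
--         start = 0
--     else:
--         p = raw.find("\nAbstract:")
--         if p == -1:
--             return (raw, None)
--         start = p + 1
--     header = raw[:start - 1] if start > 0 else ""
--     nl = raw.find("\n", start)
--     body = "" if nl == -1 else raw[nl + 1:]
--     return (header, body)
-- ===== Notes on version B (the rewrite author's own statement) =====
-- stated objective: idiomatic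
-- what changed: Instead of splitting the text into a list of lines and scanning them with an index, B finds the marker line by a direct substring search ('Abstract:' prefix or first '\nAbstract:') on the raw string and slices the header and body out of it, never building a line list.
import Mathlib
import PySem

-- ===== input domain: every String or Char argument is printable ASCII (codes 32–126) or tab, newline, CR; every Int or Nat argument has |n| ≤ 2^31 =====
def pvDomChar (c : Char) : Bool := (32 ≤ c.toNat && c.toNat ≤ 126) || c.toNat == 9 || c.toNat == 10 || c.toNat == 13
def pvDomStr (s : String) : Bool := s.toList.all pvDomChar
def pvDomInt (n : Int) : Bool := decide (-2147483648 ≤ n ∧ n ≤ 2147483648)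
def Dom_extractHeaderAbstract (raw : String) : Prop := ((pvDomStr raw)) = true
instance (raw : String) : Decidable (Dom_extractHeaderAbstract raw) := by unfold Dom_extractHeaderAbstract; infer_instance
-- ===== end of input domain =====

-- B replaces A's split-into-lines-and-index-scan with a direct substring search on the raw text ('Abstract:' prefix or first "\nAbstract:") and two slices; no line list is built (same O(n) cost).

-- ===== PORT A =====
-- A's loop: 'for i in range(len(splitRaw)): if splitRaw[i].startswith("Abstract:"): return …' — first matching index
def pvScanA (lines : List String) (i : Nat) : Option Nat :=
  match lines with
  | [] => none
  | l :: rest => if PySem.Str.startswith l "Abstract:" then some i else pvScanA rest (i + 1)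

def extractHeaderAbstract (raw : String) : String × Option String :=
  let splitRaw := (PySem.Str.split? raw "\n").getD []
  match pvScanA splitRaw 0 with
  | some i =>
      (PySem.Str.join "\n" (PySem.List.slice splitRaw none (some (i : Int))),
       some (PySem.Str.join "\n"
         (if (i : Int) + 1 < splitRaw.length then PySem.List.slice splitRaw (some ((i : Int) + 1)) none else [])))
  | none => (raw, none)

-- ===== PORT B =====
def extractHeaderAbstract_alt (raw : String) : String × Option String :=
  let start? : Option Int :=
    if PySem.Str.startswith raw "Abstract:" then some 0
    else
      let p := PySem.Str.find raw "\nAbstract:"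
      if p = -1 then none else some (p + 1)
  match start? with
  | none => (raw, none)
  | some start =>
      let header := if start > 0 then PySem.Str.slice raw none (some (start - 1)) else ""
      let nl := PySem.Str.findFrom raw "\n" start
      let body := if nl = -1 then "" else PySem.Str.slice raw (some (nl + 1)) none
      (header, some body)


-- ===== PRECONDITION & SPEC =====
def Spec_extractHeaderAbstract (raw : String) (out : String × Option String) : Prop := out = extractHeaderAbstract_alt raw
instance (raw : String) (out : String × Option String) : Decidable (Spec_extractHeaderAbstract raw out) := by unfold Spec_extractHeaderAbstract; infer_instance

-- ===== CLAIM (what is proved, stated in full; the proofs are below) =====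
def Claim_equal_extractHeaderAbstract : Prop := ∀ (raw : String), Dom_extractHeaderAbstract raw → Spec_extractHeaderAbstract raw (extractHeaderAbstract raw)

-- ===== LEMMAS AND PROOFS =====

def pvPreHead (pre : List Char) : List (List Char) → List (List Char)
  | [] => [pre]
  | h :: t => (pre ++ h) :: t

def pvSplit : List Char → List (List Char)
  | [] => [[]]
  | c :: rest => if c = '\n' then [] :: pvSplit rest else pvPreHead [c] (pvSplit rest)

theorem pvSplit_ne_nil (cs : List Char) : pvSplit cs ≠ [] := by
  induction cs with
  | nil => simp [pvSplit]
  | cons c rest ih =>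
    by_cases hc : c = '\n'
    · simp [pvSplit, hc]
    · cases h : pvSplit rest with
      | nil => exact absurd h ih
      | cons a t => simp [pvSplit, hc, h, pvPreHead]

theorem pvSplit_free (cs : List Char) : ∀ l ∈ pvSplit cs, '\n' ∉ l := by
  induction cs with
  | nil => simp [pvSplit]
  | cons c rest ih =>
    by_cases hc : c = '\n'
    · simp only [pvSplit, hc]
      intro l hl
      rcases List.mem_cons.mp hl with h | h
      · simp [h]
      · exact ih l h
    · cases h : pvSplit rest with
      | nil => exact absurd h (pvSplit_ne_nil rest)
      | cons a t =>
        simp only [pvSplit, hc, h, pvPreHead]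
        intro l hl
        rcases List.mem_cons.mp hl with h' | h'
        · subst h'
          intro hmem
          rcases List.mem_cons.mp hmem with h2 | h2
          · exact hc h2.symm
          · exact ih a (h ▸ (List.mem_cons_self : a ∈ a :: t)) h2
        · exact ih l (h ▸ List.mem_cons_of_mem _ h')

theorem pvJn_pvSplit (cs : List Char) : PySem.Chars.join ['\n'] (pvSplit cs) = cs := by
  induction cs with
  | nil => simp [pvSplit, PySem.Chars.join_singleton]
  | cons c rest ih =>
    by_cases hc : c = '\n'
    · subst hc
      cases h : pvSplit rest with
      | nil => exact absurd h (pvSplit_ne_nil rest)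
      | cons a t =>
        rw [h] at ih
        simp only [pvSplit, h, if_true]
        rw [PySem.Chars.join_cons_cons]
        simp [ih]
    · cases h : pvSplit rest with
      | nil => exact absurd h (pvSplit_ne_nil rest)
      | cons a t =>
        rw [h] at ih
        cases t with
        | nil =>
          simp only [pvSplit, if_neg hc, h, pvPreHead, PySem.Chars.join_singleton] at *
          simp [ih]
        | cons b t' =>
          simp only [pvSplit, if_neg hc, h, pvPreHead] at *
          rw [PySem.Chars.join_cons_cons] at ih ⊢
          simp [← ih]

theorem pvGo (l : List Char) : ∀ (fuel : Nat) (cur : List Char) (acc : List (List Char)),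
    l.length ≤ fuel →
    PySem.Chars.splitOn.go ['\n'] fuel l cur acc = acc.reverse ++ pvPreHead cur.reverse (pvSplit l) := by
  induction l with
  | nil =>
    intro fuel cur acc _
    cases fuel <;> simp [PySem.Chars.splitOn.go, pvSplit, pvPreHead]
  | cons c rest ih =>
    intro fuel cur acc hf
    cases fuel with
    | zero => simp at hf
    | succ f =>
      rw [PySem.Chars.splitOn.go]
      have hflen : rest.length ≤ f := by simpa using hf
      by_cases hc : c = '\n'
      · subst hc
        have hp : List.isPrefixOf ['\n'] ('\n' :: rest) = true := by simp [List.isPrefixOf]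
        rw [if_pos hp]
        have hd : List.drop ['\n'].length ('\n' :: rest) = rest := rfl
        rw [hd, ih f [] (cur.reverse :: acc) hflen]
        cases h : pvSplit rest with
        | nil => exact absurd h (pvSplit_ne_nil rest)
        | cons a t => simp [pvSplit, h, pvPreHead]
      · have hp : List.isPrefixOf ['\n'] (c :: rest) = false := by
          simp [List.isPrefixOf]
          intro h; exact absurd h.symm hc
        rw [if_neg (by simp [hp])]
        rw [ih f (c :: cur) acc hflen]
        cases h : pvSplit rest with
        | nil => exact absurd h (pvSplit_ne_nil rest)
        | cons a t => simp [pvSplit, hc, h, pvPreHead]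

theorem pvSplitOn_eq (cs : List Char) : PySem.Chars.splitOn cs ['\n'] = pvSplit cs := by
  rw [PySem.Chars.splitOn]
  rw [pvGo cs (cs.length + 1) [] [] (Nat.le_succ _)]
  cases h : pvSplit cs with
  | nil => exact absurd h (pvSplit_ne_nil cs)
  | cons a t => simp [pvPreHead]


def pvMarker : List Char := "Abstract:".toList
def pvJn (ll : List (List Char)) : List Char := PySem.Chars.join ['\n'] ll
def pvScan (sub : List Char) : List (List Char) → Option Nat
  | [] => none
  | l :: rest => if sub.isPrefixOf l then some 0 else (pvScan sub rest).map (· + 1)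
def pvPos (ll : List (List Char)) (i : Nat) : Nat := ((ll.take i).map List.length).sum + i

-- L0: find.go is -1 or ≥ 0 (started from a Nat index)
theorem pvFindGoNonneg (sub : List Char) : ∀ (l : List Char) (k : Nat),
    PySem.Chars.find.go sub l k = -1 ∨ 0 ≤ PySem.Chars.find.go sub l k := by
  intro l
  induction l with
  | nil =>
    intro k
    rw [PySem.Chars.find.go.eq_1]
    split
    · right; exact Int.natCast_nonneg k
    · left; rfl
  | cons c t ih =>
    intro k
    rw [PySem.Chars.find.go.eq_2]
    split
    · right; exact Int.natCast_nonneg k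
    · exact_mod_cast ih (k + 1)

-- L3: shift of the start index
theorem pvFindGoShift (sub : List Char) : ∀ (l : List Char) (k : Nat),
    PySem.Chars.find.go sub l k =
      if PySem.Chars.find.go sub l 0 = -1 then -1 else PySem.Chars.find.go sub l 0 + k := by
  intro l
  induction l with
  | nil =>
    intro k
    rw [PySem.Chars.find.go.eq_1, PySem.Chars.find.go.eq_1]
    split
    · simp
    · simp
  | cons c t ih =>
    intro k
    rw [PySem.Chars.find.go.eq_2, PySem.Chars.find.go.eq_2]
    split
    · simp
    · rw [ih (k + 1)]
      simp only [Nat.zero_add]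
      rw [ih 1]
      rcases pvFindGoNonneg sub t 0 with h | h
      · simp [h]
      · have hne : PySem.Chars.find.go sub t 0 ≠ -1 := by omega
        have hne2 : PySem.Chars.find.go sub t 0 + ((1:Nat):Int) ≠ -1 := by
          push_cast; omega
        simp only [if_neg hne]
        rw [if_neg hne2]
        push_cast; ring

-- L2: skip a '\n'-free block when searching for a pattern that starts with '\n'
theorem pvFindGoSkip (sub' : List Char) : ∀ (l t : List Char), '\n' ∉ l → ∀ (k : Nat),
    PySem.Chars.find.go ('\n' :: sub') (l ++ t) k =
      PySem.Chars.find.go ('\n' :: sub') t (k + l.length) := by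
  intro l
  induction l with
  | nil => intro t _ k; simp
  | cons c cr ih =>
    intro t hl k
    have hc : c ≠ '\n' := fun h => hl (h ▸ List.mem_cons_self)
    rw [List.cons_append, PySem.Chars.find.go.eq_2]
    rw [if_neg (by simp [List.isPrefixOf]; intro h; exact absurd h.symm hc)]
    rw [ih t (fun h => hl (List.mem_cons_of_mem _ h)) (k + 1)]
    congr 1
    simp; omega

-- L1: a '\n'-free pattern is a prefix of 'l ++ \n :: t' iff it is a prefix of the '\n'-free l
theorem pvPrefixThru : ∀ (l sub t : List Char), '\n' ∉ sub → '\n' ∉ l →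
    sub.isPrefixOf (l ++ '\n' :: t) = sub.isPrefixOf l := by
  intro l
  induction l with
  | nil =>
    intro sub t hsub _
    cases sub with
    | nil => simp [List.isPrefixOf]
    | cons s ss =>
      have hs : s ≠ '\n' := fun h => hsub (h ▸ List.mem_cons_self)
      simp [List.isPrefixOf]
      intro h; exact absurd h hs
  | cons c cr ih =>
    intro sub t hsub hl
    cases sub with
    | nil => simp [List.isPrefixOf]
    | cons s ss =>
      simp only [List.cons_append, List.isPrefixOf]
      rw [ih ss t (fun h => hsub (List.mem_cons_of_mem _ h)) (fun h => hl (List.mem_cons_of_mem _ h))]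

-- find of a '\n'-starting pattern in a '\n'-free string is -1
theorem pvFindGoFreeNone (sub' : List Char) (l : List Char) (hl : '\n' ∉ l) (k : Nat) :
    PySem.Chars.find.go ('\n' :: sub') l k = -1 := by
  have := pvFindGoSkip sub' l [] hl k
  simp only [List.append_nil] at this
  rw [this, PySem.Chars.find.go.eq_1]
  simp

-- find "\n" in 'l ++ \n :: t' with l '\n'-free is l.length
theorem pvFindNl (l t : List Char) (hl : '\n' ∉ l) :
    PySem.Chars.find (l ++ '\n' :: t) ['\n'] = l.length := by
  rw [PySem.Chars.find, pvFindGoSkip [] l ('\n' :: t) hl 0]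
  rw [PySem.Chars.find.go.eq_2, if_pos (by simp [List.isPrefixOf])]
  simp

theorem pvFindNlFree (l : List Char) (hl : '\n' ∉ l) :
    PySem.Chars.find l ['\n'] = -1 := by
  rw [PySem.Chars.find, pvFindGoFreeNone [] l hl 0]

theorem pvJn_cons (l : List Char) (t : List (List Char)) (h : t ≠ []) :
    pvJn (l :: t) = l ++ '\n' :: pvJn t := by
  cases t with
  | nil => exact absurd rfl h
  | cons q rest =>
    rw [pvJn, PySem.Chars.join_cons_cons]
    simp [pvJn]

theorem pvPosCons (l : List Char) (ll : List (List Char)) (j : Nat) :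
    pvPos (l :: ll) (j + 1) = l.length + 1 + pvPos ll j := by
  simp [pvPos, List.take_succ_cons]
  omega

theorem pvPosSucc (ll : List (List Char)) (i : Nat) (q : List Char) (rest' : List (List Char))
    (h : ll.drop i = q :: rest') : pvPos ll (i + 1) = pvPos ll i + q.length + 1 := by
  induction ll generalizing i with
  | nil => simp at h
  | cons l t ih =>
    cases i with
    | zero =>
      simp at h
      rw [h.1]
      simp [pvPos]
    | succ j =>
      rw [pvPosCons, pvPosCons]
      rw [ih j (by simpa using h)]
      omega

theorem pvPosLe (ll : List (List Char)) (i : Nat) (h : i < ll.length) :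
    pvPos ll i ≤ (pvJn ll).length := by
  induction ll generalizing i with
  | nil => simp at h
  | cons l t ih =>
    cases i with
    | zero => simp [pvPos]
    | succ j =>
      have ht : t ≠ [] := by
        cases t with
        | nil => simp at h
        | cons a b => simp
      rw [pvPosCons, pvJn_cons l t ht]
      have := ih j (by simpa using h)
      simp only [List.length_append, List.length_cons]
      omega

theorem pvDropPos (ll : List (List Char)) (i : Nat) (h : i ≤ ll.length) :
    List.drop (pvPos ll i) (pvJn ll) = pvJn (ll.drop i) := by
  induction ll generalizing i with
  | nil => simp at h; simp [h, pvPos]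
  | cons l t ih =>
    cases i with
    | zero => simp [pvPos]
    | succ j =>
      cases t with
      | nil =>
        have hj : j = 0 := by simp at h; omega
        subst hj
        simp [pvPos, pvJn, PySem.Chars.join_singleton, PySem.Chars.join_nil]
      | cons q rest =>
        rw [pvPosCons, pvJn_cons l (q :: rest) (by simp)]
        have hsh : l ++ '\n' :: pvJn (q :: rest) = (l ++ ['\n']) ++ pvJn (q :: rest) := by simp
        have hlen : l.length + 1 + pvPos (q :: rest) j = (l ++ ['\n']).length + pvPos (q :: rest) j := by
          simp
        rw [hsh, hlen, List.drop_length_add_append]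
        rw [ih j (by simpa using h)]
        simp

theorem pvTakePos (ll : List (List Char)) (i : Nat) (h1 : 1 ≤ i) (h2 : i ≤ ll.length) :
    List.take (pvPos ll i - 1) (pvJn ll) = pvJn (ll.take i) := by
  induction ll generalizing i with
  | nil => simp at h2; omega
  | cons l t ih =>
    cases i with
    | zero => omega
    | succ j =>
      cases j with
      | zero =>
        have : pvPos (l :: t) 1 - 1 = l.length := by simp [pvPos]
        rw [this]
        cases t with
        | nil => simp [pvJn, PySem.Chars.join_singleton]
        | cons q rest =>
          rw [pvJn_cons l (q :: rest) (by simp)]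
          simp [pvJn, PySem.Chars.join_singleton]
      | succ j' =>
        have ht : t ≠ [] := by
          cases t with
          | nil => simp at h2
          | cons a b => simp
        rw [pvPosCons, pvJn_cons l t ht]
        have htk : (l :: t).take (j' + 1 + 1) = l :: t.take (j' + 1) := by simp
        rw [htk]
        have htk2 : t.take (j' + 1) ≠ [] := by
          cases t with
          | nil => exact absurd rfl ht
          | cons a b => simp
        rw [pvJn_cons l (t.take (j' + 1)) htk2]
        have hpos : 1 ≤ pvPos t (j' + 1) := by simp [pvPos]; omega
        have hlen : l.length + 1 + pvPos t (j' + 1) - 1 = (l ++ ['\n']).length + (pvPos t (j' + 1) - 1) := by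
          simp; omega
        have hsh : l ++ '\n' :: pvJn t = (l ++ ['\n']) ++ pvJn t := by simp
        rw [hlen, hsh, List.take_length_add_append]
        rw [ih (j' + 1) (by omega) (by simpa using h2)]
        simp

theorem pvScanSome (sub : List Char) : ∀ (ll : List (List Char)) (i : Nat),
    pvScan sub ll = some i → ∃ q rest', ll.drop i = q :: rest' ∧ sub.isPrefixOf q = true := by
  intro ll
  induction ll with
  | nil => intro i h; simp [pvScan] at h
  | cons l t ih =>
    intro i h
    simp only [pvScan] at h
    by_cases hp : sub.isPrefixOf l
    · rw [if_pos hp] at h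
      cases h
      exact ⟨l, t, rfl, hp⟩
    · rw [if_neg hp] at h
      cases hsc : pvScan sub t with
      | none => rw [hsc] at h; simp at h
      | some j =>
        rw [hsc] at h
        simp at h
        obtain ⟨q, rest', hd, hq⟩ := ih j hsc
        exact ⟨q, rest', by rw [← h]; simpa using hd, hq⟩

theorem pvPrefixHead (sub q : List Char) (rest : List (List Char)) (hq : sub.isPrefixOf q = true) :
    sub.isPrefixOf (pvJn (q :: rest)) = true := by
  have h1 : sub <+: q := List.isPrefixOf_iff_prefix.mp hq
  cases rest with
  | nil =>
    rw [show pvJn [q] = q from PySem.Chars.join_singleton _ _]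
    exact List.isPrefixOf_iff_prefix.mpr h1
  | cons b r =>
    rw [pvJn_cons q (b :: r) (by simp)]
    exact List.isPrefixOf_iff_prefix.mpr (h1.trans (List.prefix_append _ _))

theorem pvS (sub : List Char) (hsub : '\n' ∉ sub) :
    ∀ ll : List (List Char), ll ≠ [] → (∀ l ∈ ll, '\n' ∉ l) →
    (if sub.isPrefixOf (pvJn ll) then some (0 : Int)
     else if PySem.Chars.find (pvJn ll) ('\n' :: sub) = -1 then none
     else some (PySem.Chars.find (pvJn ll) ('\n' :: sub) + 1))
    = (pvScan sub ll).map (fun i => (pvPos ll i : Int)) := by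
  intro ll
  induction ll with
  | nil => intro h; exact absurd rfl h
  | cons l ll' ih =>
    intro _ hfree
    have hl : '\n' ∉ l := hfree l List.mem_cons_self
    have hfree' : ∀ x ∈ ll', '\n' ∉ x := fun x hx => hfree x (List.mem_cons_of_mem _ hx)
    cases ll' with
    | nil =>
      rw [show pvJn [l] = l from PySem.Chars.join_singleton _ _]
      by_cases hp : sub.isPrefixOf l
      · simp [hp, pvScan, pvPos]
      · rw [if_neg (by simp [hp])]
        rw [show PySem.Chars.find l ('\n' :: sub) = -1 from pvFindGoFreeNone sub l hl 0]
        simp [pvScan, hp]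
    | cons q rest =>
      have hJcons : pvJn (l :: q :: rest) = l ++ '\n' :: pvJn (q :: rest) :=
        pvJn_cons l (q :: rest) (by simp)
      rw [hJcons]
      by_cases hpl : sub.isPrefixOf l
      · rw [if_pos (by rw [pvPrefixThru l sub _ hsub hl]; exact hpl)]
        simp [pvScan, hpl, pvPos]
      · rw [if_neg (by rw [pvPrefixThru l sub _ hsub hl]; simp [hpl])]
        have hfind : PySem.Chars.find (l ++ '\n' :: pvJn (q :: rest)) ('\n' :: sub)
            = PySem.Chars.find.go ('\n' :: sub) ('\n' :: pvJn (q :: rest)) l.length := by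
          rw [PySem.Chars.find, pvFindGoSkip sub l _ hl 0]
          simp
        rw [hfind, PySem.Chars.find.go.eq_2]
        have hpfx : List.isPrefixOf ('\n' :: sub) ('\n' :: pvJn (q :: rest))
            = sub.isPrefixOf (pvJn (q :: rest)) := by
          simp [List.isPrefixOf]
        by_cases hq : sub.isPrefixOf q
        · have hin : (if ('\n' :: sub).isPrefixOf ('\n' :: pvJn (q :: rest)) = true
              then ((l.length : Int))
              else PySem.Chars.find.go ('\n' :: sub) (pvJn (q :: rest)) (l.length + 1))
              = (l.length : Int) := by
            rw [hpfx]
            exact if_pos (pvPrefixHead sub q rest hq)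
          rw [hin]
          rw [if_neg (by omega)]
          have hscan : pvScan sub (l :: q :: rest) = some 1 := by
            rw [show pvScan sub (l :: q :: rest) = if sub.isPrefixOf l then some 0 else (pvScan sub (q :: rest)).map (· + 1) from rfl, if_neg hpl, show pvScan sub (q :: rest) = if sub.isPrefixOf q then some 0 else (pvScan sub rest).map (· + 1) from rfl, if_pos hq]
            rfl
          rw [hscan]
          simp only [Option.map_some]
          rw [show pvPos (l :: q :: rest) 1 = l.length + 1 from by simp [pvPos]]
          norm_cast
        · have hJ' : sub.isPrefixOf (pvJn (q :: rest)) = false := by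
            cases rest with
            | nil =>
              rw [show pvJn [q] = q from PySem.Chars.join_singleton _ _]
              simp [hq]
            | cons b r =>
              rw [pvJn_cons q (b :: r) (by simp)]
              rw [pvPrefixThru q sub _ hsub (hfree' q List.mem_cons_self)]
              simp [hq]
          have hin : (if ('\n' :: sub).isPrefixOf ('\n' :: pvJn (q :: rest)) = true
              then ((l.length : Int))
              else PySem.Chars.find.go ('\n' :: sub) (pvJn (q :: rest)) (l.length + 1))
              = PySem.Chars.find.go ('\n' :: sub) (pvJn (q :: rest)) (l.length + 1) := by
            rw [hpfx, hJ']
            exact if_neg (by simp)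
          rw [hin]
          have hshift := pvFindGoShift ('\n' :: sub) (pvJn (q :: rest)) (l.length + 1)
          rw [hshift]
          have hIH := ih (by simp) hfree'
          rw [if_neg (by simp [hJ'])] at hIH
          have hfind0 : PySem.Chars.find.go ('\n' :: sub) (pvJn (q :: rest)) 0
              = PySem.Chars.find (pvJn (q :: rest)) ('\n' :: sub) := rfl
          rw [hfind0]
          cases hsc : pvScan sub (q :: rest) with
          | none =>
            rw [hsc] at hIH
            simp only [Option.map_none] at hIH
            have hm1 : PySem.Chars.find (pvJn (q :: rest)) ('\n' :: sub) = -1 := by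
              by_contra hne
              rw [if_neg hne] at hIH
              simp at hIH
            have hscan : pvScan sub (l :: q :: rest) = none := by
              rw [show pvScan sub (l :: q :: rest) = if sub.isPrefixOf l then some 0 else (pvScan sub (q :: rest)).map (· + 1) from rfl, if_neg hpl, hsc]
              rfl
            rw [hm1, hscan]
            simp
          | some j =>
            rw [hsc] at hIH
            simp only [Option.map_some] at hIH
            have hne : PySem.Chars.find (pvJn (q :: rest)) ('\n' :: sub) ≠ -1 := by
              intro hm1
              rw [if_pos hm1] at hIH
              simp at hIH
            rw [if_neg hne] at hIH
            have hval : PySem.Chars.find (pvJn (q :: rest)) ('\n' :: sub) + 1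
                = (pvPos (q :: rest) j : Int) := by
              simpa using hIH
            have h0 : 0 ≤ PySem.Chars.find (pvJn (q :: rest)) ('\n' :: sub) := by
              rcases pvFindGoNonneg ('\n' :: sub) (pvJn (q :: rest)) 0 with h | h
              · exact absurd h hne
              · exact h
            rw [if_neg hne]
            rw [if_neg (by push_cast; omega)]
            have hscan : pvScan sub (l :: q :: rest) = some (j + 1) := by
              rw [show pvScan sub (l :: q :: rest) = if sub.isPrefixOf l then some 0 else (pvScan sub (q :: rest)).map (· + 1) from rfl, if_neg hpl, hsc]
              rfl
            rw [hscan]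
            simp only [Option.map_some]
            have hposc := pvPosCons l (q :: rest) j
            rw [hposc]
            push_cast
            simp only [Option.some.injEq]
            omega


theorem pvNlList : ("\n" : String).toList = ['\n'] := by decide
theorem pvNlAbsList : ("\nAbstract:" : String).toList = '\n' :: pvMarker := by decide
theorem pvMarkerFree : '\n' ∉ pvMarker := by decide

theorem pvStartswith_eq (s : String) :
    PySem.Str.startswith s "Abstract:" = pvMarker.isPrefixOf s.toList := rfl

theorem pvFind_eq (s : String) :
    PySem.Str.find s "\nAbstract:" = PySem.Chars.find s.toList ('\n' :: pvMarker) := by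
  rw [PySem.Str.find_eq, pvNlAbsList]

theorem pvSplitL (raw : String) :
    ∃ L : List String, PySem.Str.split? raw "\n" = some L ∧ L.map String.toList = pvSplit raw.toList := by
  have h := PySem.Str.split?_map raw "\n"
  rw [pvNlList, PySem.Chars.split?.eq_1, if_neg (by simp), pvSplitOn_eq] at h
  cases hL : PySem.Str.split? raw "\n" with
  | none => rw [hL] at h; simp at h
  | some L =>
    rw [hL] at h
    simp only [Option.map_some, Option.some.injEq] at h
    exact ⟨L, rfl, h⟩

theorem pvScanA_eq : ∀ (L : List String) (i : Nat),
    pvScanA L i = (pvScan pvMarker (L.map String.toList)).map (fun j => i + j) := by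
  intro L
  induction L with
  | nil => intro i; rfl
  | cons l t ih =>
    intro i
    simp only [pvScanA, List.map_cons, pvScan, pvStartswith_eq]
    by_cases hp : pvMarker.isPrefixOf l.toList
    · simp [hp]
    · rw [if_neg hp, if_neg hp, ih (i + 1)]
      cases pvScan pvMarker (t.map String.toList) with
      | none => rfl
      | some j => simp; omega

theorem pvScanA0 (L : List String) : pvScanA L 0 = pvScan pvMarker (L.map String.toList) := by
  rw [pvScanA_eq]
  cases pvScan pvMarker (L.map String.toList) with
  | none => rfl
  | some j => simp

theorem pvBnone (raw : String) (hs : pvMarker.isPrefixOf raw.toList = false)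
    (hf : PySem.Chars.find raw.toList ('\n' :: pvMarker) = -1) :
    extractHeaderAbstract_alt raw = (raw, none) := by
  rw [extractHeaderAbstract_alt]
  simp only [pvStartswith_eq, hs, pvFind_eq, hf]
  simp

theorem pvBzero (raw : String) (hs : pvMarker.isPrefixOf raw.toList = true) :
    extractHeaderAbstract_alt raw =
      ("", some (if PySem.Chars.find raw.toList ['\n'] = -1 then ""
                 else PySem.Str.slice raw (some (PySem.Chars.find raw.toList ['\n'] + 1)) none)) := by
  have hnl : PySem.Str.findFrom raw "\n" 0 = PySem.Chars.find raw.toList ['\n'] := by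
    rw [PySem.Str.findFrom_eq, pvNlList]
    exact PySem.Chars.findFrom_zero _ _
  rw [extractHeaderAbstract_alt]
  simp only [pvStartswith_eq, hs, if_true, hnl]
  simp

theorem pvBpos (raw : String) (hs : pvMarker.isPrefixOf raw.toList = false) (f : Int)
    (hf : PySem.Chars.find raw.toList ('\n' :: pvMarker) = f) (h0 : 0 ≤ f) :
    extractHeaderAbstract_alt raw =
      (PySem.Str.slice raw none (some f),
       some (if PySem.Str.findFrom raw "\n" (f + 1) = -1 then ""
             else PySem.Str.slice raw (some (PySem.Str.findFrom raw "\n" (f + 1) + 1)) none)) := by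
  rw [extractHeaderAbstract_alt]
  simp only [pvStartswith_eq, hs, pvFind_eq, hf, Bool.false_eq_true, if_false]
  rw [if_neg (show ¬(f = -1) by omega)]
  change (if f + 1 > 0 then PySem.Str.slice raw none (some (f + 1 - 1)) else "",
      some (if PySem.Str.findFrom raw "\n" (f + 1) = -1 then ""
            else PySem.Str.slice raw (some (PySem.Str.findFrom raw "\n" (f + 1) + 1)) none)) = _
  rw [if_pos (show f + 1 > 0 by omega)]
  norm_num

theorem pvDropSucc (ll : List (List Char)) (i : Nat) (q : List Char) (rest' : List (List Char))
    (h : ll.drop i = q :: rest') : ll.drop (i + 1) = rest' := by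
  have h2 : (ll.drop i).drop 1 = ll.drop (i + 1) := by
    rw [List.drop_drop]
  rw [← h2, h]
  rfl

theorem pvPosZero (ll : List (List Char)) : pvPos ll 0 = 0 := by simp [pvPos]

theorem pvPosGe (ll : List (List Char)) (i : Nat) : i ≤ pvPos ll i := by simp [pvPos]

theorem pvMain (raw : String) : extractHeaderAbstract raw = extractHeaderAbstract_alt raw := by
  obtain ⟨L, hL, hLl⟩ := pvSplitL raw
  have hne : pvSplit raw.toList ≠ [] := pvSplit_ne_nil raw.toList
  have hfree : ∀ l ∈ pvSplit raw.toList, '\n' ∉ l := pvSplit_free raw.toList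
  have hjn : pvJn (pvSplit raw.toList) = raw.toList := pvJn_pvSplit raw.toList
  have hS := pvS pvMarker pvMarkerFree (pvSplit raw.toList) hne hfree
  rw [hjn] at hS
  have hA : extractHeaderAbstract raw =
      (match pvScan pvMarker (pvSplit raw.toList) with
      | some i =>
          (PySem.Str.join "\n" (PySem.List.slice L none (some (i : Int))),
           some (PySem.Str.join "\n"
             (if (i : Int) + 1 < L.length then PySem.List.slice L (some ((i : Int) + 1)) none else [])))
      | none => (raw, none)) := by
    rw [extractHeaderAbstract, hL]
    simp only [Option.getD_some, pvScanA0, hLl]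
  rw [hA]
  cases hsc : pvScan pvMarker (pvSplit raw.toList) with
  | none =>
    rw [hsc] at hS
    simp only [Option.map_none] at hS
    have hs : pvMarker.isPrefixOf raw.toList = false := by
      by_contra h
      rw [if_pos (by simpa using h)] at hS
      simp at hS
    rw [if_neg (by simp [hs])] at hS
    have hf : PySem.Chars.find raw.toList ('\n' :: pvMarker) = -1 := by
      by_contra h
      rw [if_neg h] at hS
      simp at hS
    rw [pvBnone raw hs hf]
  | some i =>
    rw [hsc] at hS
    simp only [Option.map_some] at hS
    obtain ⟨q, rest', hdrop, hq⟩ := pvScanSome pvMarker (pvSplit raw.toList) i hsc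
    have hilen : i < (pvSplit raw.toList).length := by
      by_contra h
      rw [List.drop_eq_nil_of_le (by omega)] at hdrop
      simp at hdrop
    have hqmem : q ∈ pvSplit raw.toList := List.mem_of_mem_drop (hdrop ▸ List.mem_cons_self)
    have hfq : '\n' ∉ q := hfree q hqmem
    have hlenL : L.length = (pvSplit raw.toList).length := by rw [← hLl]; simp
    have hX : (if (i : Int) + 1 < L.length then PySem.List.slice L (some ((i : Int) + 1)) none else [])
        = L.drop (i + 1) := by
      by_cases hc : (i : Int) + 1 < L.length
      · rw [if_pos hc, show ((i : Int) + 1) = (((i + 1 : Nat) : Int)) by push_cast; ring,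
          PySem.List.slice_from_natCast]
      · rw [if_neg hc, List.drop_eq_nil_of_le (by omega)]
    change (PySem.Str.join "\n" (PySem.List.slice L none (some (i : Int))),
        some (PySem.Str.join "\n"
          (if (i : Int) + 1 < (L.length : Int) then PySem.List.slice L (some ((i : Int) + 1)) none else []))) =
      extractHeaderAbstract_alt raw
    rw [hX]
    have hfst : (PySem.Str.join "\n" (PySem.List.slice L none (some (i : Int)))).toList
        = pvJn ((pvSplit raw.toList).take i) := by
      rw [PySem.Str.toList_join, pvNlList, PySem.List.slice_to_natCast, pvJn, List.map_take, hLl]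
    have hsnd : (PySem.Str.join "\n" (L.drop (i + 1))).toList
        = pvJn ((pvSplit raw.toList).drop (i + 1)) := by
      rw [PySem.Str.toList_join, pvNlList, pvJn, List.map_drop, hLl]
    by_cases hs : pvMarker.isPrefixOf raw.toList
    · -- marker on the very first line: i = 0
      rw [if_pos (by simpa using hs)] at hS
      have hi0 : i = 0 := by
        have h1 : (pvPos (pvSplit raw.toList) i : Int) = 0 := by
          simpa using hS.symm
        have h2 := pvPosGe (pvSplit raw.toList) i
        omega
      subst hi0
      rw [pvBzero raw (by simpa using hs)]
      have hll : pvSplit raw.toList = q :: rest' := by simpa using hdrop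
      have hcs : raw.toList = pvJn (q :: rest') := by rw [← hll, hjn]
      cases rest' with
      | nil =>
        have hcq : raw.toList = q := by
          rw [hcs]; exact PySem.Chars.join_singleton _ _
        have hfind : PySem.Chars.find raw.toList ['\n'] = -1 := by
          rw [hcq]; exact pvFindNlFree q hfq
        rw [hfind, if_pos rfl]
        refine Prod.ext ?_ ?_
        · apply String.toList_inj.mp
          rw [hfst, hll]
          simp [pvJn, PySem.Chars.join_nil]
        · simp only
          congr 1
          apply String.toList_inj.mp
          rw [hsnd, hll]
          simp [pvJn, PySem.Chars.join_nil]
      | cons b r =>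
        have hcq : raw.toList = q ++ '\n' :: pvJn (b :: r) := by
          rw [hcs, pvJn_cons q (b :: r) (by simp)]
        have hfind : PySem.Chars.find raw.toList ['\n'] = (q.length : Int) := by
          rw [hcq]; exact pvFindNl q (pvJn (b :: r)) hfq
        rw [hfind, if_neg (by omega)]
        refine Prod.ext ?_ ?_
        · apply String.toList_inj.mp
          rw [hfst, hll]
          simp [pvJn, PySem.Chars.join_nil]
        · simp only
          congr 1
          apply String.toList_inj.mp
          rw [hsnd, PySem.Str.toList_slice,
            show ((q.length : Int) + 1) = (((q.length + 1 : Nat)) : Int) by push_cast; ring]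
          rw [show PySem.Chars.slice raw.toList (some ((q.length + 1 : Nat) : Int)) none
              = PySem.List.slice raw.toList (some ((q.length + 1 : Nat) : Int)) none from rfl]
          rw [PySem.List.slice_from_natCast]
          have hp1 : pvPos (pvSplit raw.toList) 1 = q.length + 1 := by
            have h := pvPosSucc (pvSplit raw.toList) 0 q (b :: r) (by simpa using hdrop)
            rw [pvPosZero] at h
            simpa using h
          have hdp := pvDropPos (pvSplit raw.toList) 1 (by omega)
          rw [hjn] at hdp
          norm_num
          rw [← hp1, hdp]
          simp [List.drop_one]
    · -- marker on a later line
      rw [if_neg (by simp [hs])] at hS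
      have hfne : PySem.Chars.find raw.toList ('\n' :: pvMarker) ≠ -1 := by
        by_contra h
        rw [if_pos (by simpa using h)] at hS
        simp at hS
      rw [if_neg hfne] at hS
      have hfval : PySem.Chars.find raw.toList ('\n' :: pvMarker) + 1
          = (pvPos (pvSplit raw.toList) i : Int) := by simpa using hS
      have h0 : 0 ≤ PySem.Chars.find raw.toList ('\n' :: pvMarker) := by
        rcases pvFindGoNonneg ('\n' :: pvMarker) raw.toList 0 with h | h
        · exact absurd h hfne
        · exact h
      have hi1 : 1 ≤ i := by
        by_contra h
        have hi0 : i = 0 := by omega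
        subst hi0
        have hll : pvSplit raw.toList = q :: rest' := by simpa using hdrop
        have : pvMarker.isPrefixOf raw.toList = true := by
          rw [← hjn, hll]
          exact pvPrefixHead pvMarker q rest' hq
        exact hs (by simpa using this)
      have hposge : 1 ≤ pvPos (pvSplit raw.toList) i :=
        le_trans hi1 (pvPosGe _ i)
      have hsF : pvMarker.isPrefixOf raw.toList = false := Bool.eq_false_iff.mpr hs
      rw [pvBpos raw hsF _ rfl h0, hfval]
      have hposle : pvPos (pvSplit raw.toList) i ≤ raw.toList.length := by
        have := pvPosLe (pvSplit raw.toList) i hilen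
        rwa [hjn] at this
      have hdropcs : List.drop (pvPos (pvSplit raw.toList) i) raw.toList = pvJn (q :: rest') := by
        have h := pvDropPos (pvSplit raw.toList) i (le_of_lt hilen)
        rw [hjn, hdrop] at h
        exact h
      have hnl : PySem.Str.findFrom raw "\n" ((pvPos (pvSplit raw.toList) i : Nat) : Int)
          = (if PySem.Chars.find (pvJn (q :: rest')) ['\n'] = -1 then -1
             else ((pvPos (pvSplit raw.toList) i : Nat) : Int) + PySem.Chars.find (pvJn (q :: rest')) ['\n']) := by
        rw [PySem.Str.findFrom_eq, pvNlList,
          PySem.Chars.findFrom_natCast raw.toList ['\n'] (pvPos (pvSplit raw.toList) i) hposle,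
          hdropcs]
      have hf1 : PySem.Chars.find raw.toList ('\n' :: pvMarker)
          = ((pvPos (pvSplit raw.toList) i : Nat) : Int) - 1 := by omega
      rw [hf1]
      refine Prod.ext ?_ ?_
      · show PySem.Str.join "\n" (PySem.List.slice L none (some (i : Int)))
            = PySem.Str.slice raw none (some (((pvPos (pvSplit raw.toList) i : Nat) : Int) - 1))
        apply String.toList_inj.mp
        rw [hfst, PySem.Str.toList_slice]
        rw [PySem.Chars.slice_eq_listSlice,
          PySem.List.slice_to raw.toList (b := ((pvPos (pvSplit raw.toList) i : Nat) : Int) - 1) (by omega)]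
        rw [show (((pvPos (pvSplit raw.toList) i : Nat) : Int) - 1).toNat
            = pvPos (pvSplit raw.toList) i - 1 by omega]
        have htp := pvTakePos (pvSplit raw.toList) i hi1 (le_of_lt hilen)
        rw [hjn] at htp
        exact htp.symm
      · show some (PySem.Str.join "\n" (L.drop (i + 1))) = _
        congr 1
        rw [hnl]
        cases rest' with
        | nil =>
          have hfind : PySem.Chars.find (pvJn (q :: ([] : List (List Char)))) ['\n'] = -1 := by
            rw [show pvJn [q] = q from PySem.Chars.join_singleton _ _]
            exact pvFindNlFree q hfq
          rw [hfind, if_pos rfl, if_pos rfl]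
          apply String.toList_inj.mp
          rw [hsnd, pvDropSucc _ i q [] hdrop]
          simp [pvJn, PySem.Chars.join_nil]
        | cons b r =>
          have hfind : PySem.Chars.find (pvJn (q :: b :: r)) ['\n'] = (q.length : Int) := by
            rw [pvJn_cons q (b :: r) (by simp)]
            exact pvFindNl q (pvJn (b :: r)) hfq
          rw [hfind, if_neg (by omega), if_neg (by omega)]
          apply String.toList_inj.mp
          rw [hsnd, PySem.Str.toList_slice]
          rw [show ((pvPos (pvSplit raw.toList) i : Nat) : Int) + (q.length : Int) + 1
              = (((pvPos (pvSplit raw.toList) i + q.length + 1 : Nat)) : Int) by push_cast; ring]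
          rw [show PySem.Chars.slice raw.toList (some (((pvPos (pvSplit raw.toList) i + q.length + 1 : Nat)) : Int)) none
              = PySem.List.slice raw.toList (some (((pvPos (pvSplit raw.toList) i + q.length + 1 : Nat)) : Int)) none from rfl]
          rw [PySem.List.slice_from_natCast]
          have hps := pvPosSucc (pvSplit raw.toList) i q (b :: r) hdrop
          have hdp := pvDropPos (pvSplit raw.toList) (i + 1) (by omega)
          rw [hjn] at hdp
          rw [← hps, hdp]

-- ===== VERDICT (by name: the statement is the Claim_ definition above) =====
theorem extractHeaderAbstract_spec : Claim_equal_extractHeaderAbstract := by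
  intro raw _
  show extractHeaderAbstract raw = extractHeaderAbstract_alt raw
  exact pvMain raw
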